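-- pv_equiv track=rewrite | github.com/woosang0430/Programmers | 온코더/3회 코딩테스트/test3.py | solution
-- ===== SOURCE A (Python) =====
-- def solution(document):
--     x = 0
--     if document[0] == ' ':
--         x = True
--     document = document.split()
--     result_list = []
--     limit_str = ['?', '!']
--     for string in document:
--         result = []
--         for i in string:
--             if i not in limit_str:
--                 result.append(i)
--                 continue
--             else:
--                 if len(result) == 0 or result[-1] not in limit_str:
--                     result.append(i)
--                     continue
--                 else:
--                     if result[-1] == '!' and i == '?':
--                         result[-1] = '?'
--
--         result_list.append(''.join(result))
--     ret = ' '.join(result_list)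
--     if x:
--         ret = ' ' + ret
--     return ret
-- ===== SOURCE B (Python) =====
-- def solution(document):
--     x = document[0] == ' '
--     words = document.split()
--     out = []
--     for word in words:
--         pieces = []
--         i = 0
--         n = len(word)
--         while i < n:
--             if word[i] in '?!':
--                 j = i
--                 while j < n and word[j] in '?!':
--                     j += 1
--                 pieces.append('?' if '?' in word[i:j] else '!')
--                 i = j
--             else:
--                 pieces.append(word[i])
--                 i += 1
--         out.append(''.join(pieces))
--     ret = ' '.join(out)
--     return ' ' + ret if x else ret
-- ===== Notes on version B (the rewrite author's own statement) =====
-- stated objective: idiomatic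
-- what changed: The inner char-by-char loop that maintains result[-1] bookkeeping (append/overwrite the last element) is replaced by a run-based scan: each maximal run of ?/! is located up front and emitted as a single '?' (if the run contains one) or '!', so no result-list state is inspected or mutated.
import Mathlib
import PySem

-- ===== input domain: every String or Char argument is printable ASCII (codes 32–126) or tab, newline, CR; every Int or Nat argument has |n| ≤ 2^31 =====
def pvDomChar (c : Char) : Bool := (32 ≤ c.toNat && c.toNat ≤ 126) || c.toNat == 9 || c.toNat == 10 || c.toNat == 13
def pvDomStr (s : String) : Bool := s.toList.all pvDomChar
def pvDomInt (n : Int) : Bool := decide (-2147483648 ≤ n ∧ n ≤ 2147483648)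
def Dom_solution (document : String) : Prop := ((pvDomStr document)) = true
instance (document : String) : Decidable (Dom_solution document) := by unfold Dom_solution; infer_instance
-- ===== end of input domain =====

-- B replaces A's incremental result[-1] bookkeeping with a run-based scan of each word
-- (each maximal ?/! run is emitted as one char); idiomatic, same cost.


-- ===== PORT A =====
-- limit_str = ['?', '!']
def pvLimit : List Char := ['?', '!']

-- one step of A's inner loop: result-list state, branch order as in A
def pvStepA (acc : List Char) (i : Char) : List Char :=
  if i ∉ pvLimit then acc ++ [i]
  else
    match acc.getLast? with
    | none => acc ++ [i]                              -- len(result) == 0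
    | some l =>
      if l ∉ pvLimit then acc ++ [i]                  -- result[-1] not in limit_str
      else if l = '!' ∧ i = '?' then acc.dropLast ++ ['?']  -- result[-1] = '?'
      else acc

def pvProcA (word : List Char) : List Char := word.foldl pvStepA []

def solution (document : String) : String :=
  let cs := document.toList
  let x := PySem.List.pyGet? cs 0 == some ' '   -- document[0] == ' ' (IndexError on "" excluded by Pre_)
  let words := PySem.Chars.split₀ cs            -- document.split()
  let result_list := words.map pvProcA
  let ret := PySem.Chars.join [' '] result_list -- ' '.join(result_list)
  String.ofList (if x then ' ' :: ret else ret)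

-- ===== PORT B =====
-- run-based scan: a maximal ?/! run becomes one char, other chars pass through
def pvProcB : List Char → List Char
  | [] => []
  | c :: rest =>
    if c ∈ pvLimit then
      (if '?' ∈ (c :: rest).takeWhile (· ∈ pvLimit) then '?' else '!')
        :: pvProcB (rest.dropWhile (· ∈ pvLimit))
    else c :: pvProcB rest
termination_by w => w.length
decreasing_by
  · have := List.length_dropWhile_le (· ∈ pvLimit) rest
    simp; omega
  · simp

def solution_alt (document : String) : String :=
  let cs := document.toList
  let x := PySem.List.pyGet? cs 0 == some ' '
  let words := PySem.Chars.split₀ cs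
  let out := words.map pvProcB
  let ret := PySem.Chars.join [' '] out
  String.ofList (if x then ' ' :: ret else ret)

-- ===== PRECONDITION & SPEC =====
-- A (and B) raise IndexError at document[0] on the empty string; only that input is excluded.
def Pre_solution (document : String) : Prop := document ≠ ""
instance (document : String) : Decidable (Pre_solution document) := by unfold Pre_solution; infer_instance
def pvWitness_solution : String := "hi?! you!?"

def Spec_solution (document : String) (out : String) : Prop := out = solution_alt document
instance (document : String) (out : String) : Decidable (Spec_solution document out) := by unfold Spec_solution; infer_instance

-- ===== CLAIM (what is proved, stated in full; the proofs are below) =====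
def Claim_equal_solution : Prop := ∀ (document : String), Dom_solution document → Pre_solution document → Spec_solution document (solution document)

-- ===== LEMMAS AND PROOFS =====

-- folding A's step over a run of punctuation chars, with a punctuation char last in acc
lemma pvFold_run (run : List Char) (h : ∀ x ∈ run, x ∈ pvLimit) (acc : List Char)
    (p : Char) (hp : p ∈ pvLimit) :
    (run.foldl pvStepA (acc ++ [p])) =
      acc ++ [if p = '?' ∨ '?' ∈ run then '?' else '!'] := by
  induction run generalizing p with
  | nil =>
    simp only [List.foldl_nil, List.not_mem_nil, or_false]
    rcases (by simpa [pvLimit] using hp) with h | h <;> simp [h]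
  | cons q run' ih =>
    have hq : q ∈ pvLimit := h q (by simp)
    have hrest : ∀ x ∈ run', x ∈ pvLimit := fun x hx => h x (by simp [hx])
    have hstep : pvStepA (acc ++ [p]) q =
        acc ++ [if p = '!' ∧ q = '?' then '?' else p] := by
      simp only [pvStepA, hq, not_true, if_false, List.getLast?_concat]
      by_cases hc : p = '!' ∧ q = '?'
      · simp [hc, pvLimit]
      · simp only [hc, if_false]
        simp [hp]
    have hp' : (if p = '!' ∧ q = '?' then '?' else p) ∈ pvLimit := by
      split <;> simp_all [pvLimit]
    rw [List.foldl_cons, hstep, ih hrest _ hp']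
    congr 1
    rcases (by simpa [pvLimit] using hp) with h1 | h1 <;>
      rcases (by simpa [pvLimit] using hq) with h2 | h2 <;>
        simp [h1, h2, List.mem_cons]

-- A's fold equals B's run recursion, for any acc whose last char is not punctuation
lemma pvFold_eq (cs : List Char) (acc : List Char)
    (hacc : ∀ l, acc.getLast? = some l → l ∉ pvLimit) :
    cs.foldl pvStepA acc = acc ++ pvProcB cs := by
  induction hn : cs.length using Nat.strong_induction_on generalizing cs acc with
  | _ n ih =>
  match cs with
  | [] => simp [pvProcB]
  | c :: rest =>
    have hstep : pvStepA acc c = acc ++ [c] := by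
      unfold pvStepA
      by_cases hc : c ∈ pvLimit
      · simp only [hc, not_true, if_false]
        match hl : acc.getLast? with
        | none => simp
        | some l => simp [hacc l hl]
      · simp [hc]
    by_cases hc : c ∈ pvLimit
    · -- punctuation run
      have hall : ∀ x ∈ rest.takeWhile (· ∈ pvLimit), x ∈ pvLimit := by
        intro x hx
        simpa using List.mem_takeWhile_imp hx
      have hB : pvProcB (c :: rest) =
          (if c = '?' ∨ '?' ∈ rest.takeWhile (· ∈ pvLimit) then '?' else '!')
            :: pvProcB (rest.dropWhile (· ∈ pvLimit)) := by
        rw [pvProcB]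
        simp [hc, List.mem_cons, eq_comm]
      rw [List.foldl_cons, hstep, hB]
      conv_lhs => rw [← List.takeWhile_append_dropWhile (p := (· ∈ pvLimit)) (l := rest)]
      rw [List.foldl_append, pvFold_run _ hall acc c hc]
      have hPlim : (if c = '?' ∨ '?' ∈ rest.takeWhile (· ∈ pvLimit) then '?' else '!') ∈ pvLimit := by
        split <;> simp [pvLimit]
      cases hdw : rest.dropWhile (· ∈ pvLimit) with
      | nil => simp [pvProcB]
      | cons d rest'' =>
        have hd : d ∉ pvLimit := by
          have := List.head?_dropWhile_not (· ∈ pvLimit) rest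
          rw [hdw] at this
          simpa using this
        have hdstep : pvStepA (acc ++ [if c = '?' ∨ '?' ∈ rest.takeWhile (· ∈ pvLimit) then '?' else '!']) d
            = acc ++ [if c = '?' ∨ '?' ∈ rest.takeWhile (· ∈ pvLimit) then '?' else '!'] ++ [d] := by
          unfold pvStepA
          simp [hd]
        have hlen : rest''.length < n := by
          have h1 := List.length_dropWhile_le (p := (· ∈ pvLimit)) (l := rest)
          rw [hdw] at h1
          simp only [List.length_cons] at h1 hn
          omega
        rw [List.foldl_cons, hdstep,
            ih rest''.length hlen rest'' _ ?_ rfl, pvProcB]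
        · simp [hd]
        · intro l hl
          simp only [List.getLast?_concat, Option.some.injEq] at hl
          rw [← hl]; exact hd
    · rw [List.foldl_cons, hstep, ih rest.length (by simp at hn; omega) rest (acc ++ [c]) ?_ rfl]
      · rw [pvProcB]
        simp [hc]
      · intro l hl
        simp only [List.getLast?_concat, Option.some.injEq] at hl
        rw [← hl]; exact hc

lemma pvProcA_eq_pvProcB (word : List Char) : pvProcA word = pvProcB word := by
  have := pvFold_eq word [] (by intro l hl; simp at hl)
  simpa [pvProcA] using this

-- ===== VERDICT (by name: the statement is the Claim_ definition above) =====
theorem solution_spec : Claim_equal_solution := by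
  intro document _ _
  unfold Spec_solution solution solution_alt
  simp [funext pvProcA_eq_pvProcB]
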